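-- pv_equiv track=rewrite | github.com/unimib-datAI/marl-dfaas | model/model_run.py | define_neighborhood
-- ===== SOURCE A (Python) =====
-- def define_neighborhood(Nn: int, neighbors_dict: dict) -> dict:
--     converted_neighbors_dict = {}
--     for n1 in range(Nn):
--         for n2 in range(Nn):
--             if f"node_{n1}" in neighbors_dict and f"node_{n2}" in neighbors_dict[f"node_{n1}"]:
--                 converted_neighbors_dict[(n1 + 1, n2 + 1)] = 1
--             else:
--                 converted_neighbors_dict[(n1 + 1, n2 + 1)] = 0
--     return converted_neighbors_dict
-- ===== SOURCE B (Python) =====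
-- def define_neighborhood(Nn: int, neighbors_dict: dict) -> dict:
--     # Hash index: map each canonical node name to its index once, then mark
--     # edges in a single pass over the neighbor lists (no per-cell scans).
--     index = {f"node_{i}": i for i in range(Nn)}
--     result = {(i + 1, j + 1): 0 for i in range(Nn) for j in range(Nn)}
--     for key, neigh in neighbors_dict.items():
--         a = index.get(key)
--         if a is not None:
--             for v in neigh:
--                 b = index.get(v)
--                 if b is not None:
--                     result[(a + 1, b + 1)] = 1
--     return result
-- ===== Notes on version B (the rewrite author's own statement) =====
-- stated objective: alternative
-- what changed: Replaces A's per-cell dict-membership test plus linear neighbor-list scan inside the Nn x Nn double loop with a prebuilt name-to-index hash map, a zero-filled grid, and a single edge-marking pass over the neighbor lists.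
import Mathlib
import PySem

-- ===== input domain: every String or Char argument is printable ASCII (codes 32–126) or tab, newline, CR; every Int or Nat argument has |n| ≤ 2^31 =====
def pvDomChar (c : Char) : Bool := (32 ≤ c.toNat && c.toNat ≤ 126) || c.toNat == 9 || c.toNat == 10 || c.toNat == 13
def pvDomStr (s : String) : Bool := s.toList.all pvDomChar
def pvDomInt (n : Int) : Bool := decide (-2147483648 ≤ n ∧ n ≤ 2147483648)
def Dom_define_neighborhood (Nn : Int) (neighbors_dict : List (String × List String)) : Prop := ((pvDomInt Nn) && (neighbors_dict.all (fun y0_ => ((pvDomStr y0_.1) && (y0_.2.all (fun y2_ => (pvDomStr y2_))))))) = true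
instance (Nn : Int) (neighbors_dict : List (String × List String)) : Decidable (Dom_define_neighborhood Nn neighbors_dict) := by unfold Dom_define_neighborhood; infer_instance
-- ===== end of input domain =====

-- B replaces A's Nn² per-cell membership tests (each with a linear neighbor-list scan)
-- by a prebuilt name→index map and a single edge-marking pass over the neighbor lists.

-- shared helper: the f-string f"node_{i}"
def pyNodeName (i : Int) : String := "node_" ++ PySem.Int.toStr i

-- ===== PORT A =====
def define_neighborhood (Nn : Int) (neighbors_dict : List (String × List String)) : List (Int × Int × Int) :=
  let nd : PySem.Dict String (List String) := PySem.Dict.ofList neighbors_dict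
  let conv : PySem.Dict (Int × Int) Int :=
    (PySem.List.pyRange 0 Nn 1).foldl (fun acc n1 =>
      (PySem.List.pyRange 0 Nn 1).foldl (fun acc n2 =>
        if nd.contains (pyNodeName n1) && (nd.getD (pyNodeName n1) []).contains (pyNodeName n2) then
          acc.insert (n1 + 1, n2 + 1) 1
        else
          acc.insert (n1 + 1, n2 + 1) 0) acc) PySem.Dict.empty
  conv.items.map (fun p => (p.1.1, p.1.2, p.2))

-- ===== PORT B =====
def define_neighborhood_alt (Nn : Int) (neighbors_dict : List (String × List String)) : List (Int × Int × Int) :=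
  let index : PySem.Dict String Int :=
    (PySem.List.pyRange 0 Nn 1).foldl (fun ix i => ix.insert (pyNodeName i) i) PySem.Dict.empty
  let result0 : PySem.Dict (Int × Int) Int :=
    (PySem.List.pyRange 0 Nn 1).foldl (fun acc i =>
      (PySem.List.pyRange 0 Nn 1).foldl (fun acc j => acc.insert (i + 1, j + 1) 0) acc) PySem.Dict.empty
  let nd : PySem.Dict String (List String) := PySem.Dict.ofList neighbors_dict
  let result : PySem.Dict (Int × Int) Int :=
    nd.items.foldl (fun acc kv =>
      match index.get? kv.1 with
      | none => acc
      | some a =>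
        kv.2.foldl (fun acc v =>
          match index.get? v with
          | none => acc
          | some b => acc.insert (a + 1, b + 1) 1) acc) result0
  result.items.map (fun p => (p.1.1, p.1.2, p.2))

-- ===== PRECONDITION & SPEC =====
def Spec_define_neighborhood (Nn : Int) (neighbors_dict : List (String × List String)) (out : List (Int × Int × Int)) : Prop := out = define_neighborhood_alt Nn neighbors_dict
instance (Nn : Int) (neighbors_dict : List (String × List String)) (out : List (Int × Int × Int)) : Decidable (Spec_define_neighborhood Nn neighbors_dict out) := by unfold Spec_define_neighborhood; infer_instance

-- ===== CLAIM (what is proved, stated in full; the proofs are below) =====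
def Claim_equal_define_neighborhood : Prop := ∀ (Nn : Int) (neighbors_dict : List (String × List String)), Dom_define_neighborhood Nn neighbors_dict → Spec_define_neighborhood Nn neighbors_dict (define_neighborhood Nn neighbors_dict)

-- ===== LEMMAS AND PROOFS =====

-- str(n) is injective for n ≥ 0 (via Nat.toDigits ↔ Nat.digits)
theorem pv_tdc_eq (n : Nat) : ∀ (f : Nat) (acc : List Char), n < f → 0 < n →
    Nat.toDigitsCore 10 f n acc = ((Nat.digits 10 n).map Nat.digitChar).reverse ++ acc := by
  induction n using Nat.strong_induction_on with
  | _ n ih =>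
    intro f acc hf hn
    match f with
    | f + 1 =>
      rw [Nat.toDigitsCore]
      by_cases h10 : n / 10 = 0
      · rw [if_pos h10, Nat.digits_def' (by norm_num : (1:Nat) < 10) hn, h10]
        simp
      · rw [if_neg h10, ih (n / 10) (by omega) f _ (by omega) (by omega),
          Nat.digits_def' (by norm_num : (1:Nat) < 10) hn]
        simp

theorem pv_toDigits10 (n : Nat) :
    Nat.toDigits 10 n = if n = 0 then ['0'] else ((Nat.digits 10 n).map Nat.digitChar).reverse := by
  by_cases h : n = 0
  · subst h; rfl
  · rw [if_neg h, Nat.toDigits, pv_tdc_eq n (n+1) [] (by omega) (by omega)]; simp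

theorem pv_digitChar_inj : ∀ a < 10, ∀ b < 10, Nat.digitChar a = Nat.digitChar b → a = b := by decide

theorem pv_digits_map_inj (l1 : List Nat) : ∀ (l2 : List Nat), (∀ x ∈ l1, x < 10) → (∀ x ∈ l2, x < 10) →
    l1.map Nat.digitChar = l2.map Nat.digitChar → l1 = l2 := by
  induction l1 with
  | nil => intro l2 h1 h2 h; cases l2 <;> simp_all
  | cons a t ih =>
    intro l2 h1 h2 h
    cases l2 with
    | nil => simp_all
    | cons b t2 =>
      simp only [List.map_cons, List.cons.injEq] at h
      have hab := pv_digitChar_inj a (h1 a (by simp)) b (h2 b (by simp)) h.1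
      have := ih t2 (fun x hx => h1 x (by simp [hx])) (fun x hx => h2 x (by simp [hx])) h.2
      simp_all

theorem pv_toDigits10_inj (m n : Nat) (h : Nat.toDigits 10 m = Nat.toDigits 10 n) : m = n := by
  rw [pv_toDigits10, pv_toDigits10] at h
  by_cases hm : m = 0 <;> by_cases hn : n = 0
  · omega
  · exfalso
    rw [if_pos hm, if_neg hn] at h
    have := Nat.getLast_digit_ne_zero 10 hn
    have h' : (Nat.digits 10 n).map Nat.digitChar = ['0'] := by
      have := congrArg List.reverse h; simpa using this.symm
    have : Nat.digits 10 n = [0] := by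
      apply pv_digits_map_inj _ _ (fun x hx => Nat.digits_lt_base (by norm_num) hx) (by simp) h'
    simp_all
  · exfalso
    rw [if_neg hm, if_pos hn] at h
    have := Nat.getLast_digit_ne_zero 10 hm
    have h' : (Nat.digits 10 m).map Nat.digitChar = ['0'] := by
      have := congrArg List.reverse h; simpa using this
    have : Nat.digits 10 m = [0] := by
      apply pv_digits_map_inj _ _ (fun x hx => Nat.digits_lt_base (by norm_num) hx) (by simp) h'
    simp_all
  · rw [if_neg hm, if_neg hn] at h
    have h' : (Nat.digits 10 m).map Nat.digitChar = (Nat.digits 10 n).map Nat.digitChar := by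
      have := congrArg List.reverse h; simpa using this
    have := pv_digits_map_inj _ _ (fun x hx => Nat.digits_lt_base (by norm_num) hx)
      (fun x hx => Nat.digits_lt_base (by norm_num) hx) h'
    calc m = Nat.ofDigits 10 (Nat.digits 10 m) := (Nat.ofDigits_digits 10 m).symm
    _ = Nat.ofDigits 10 (Nat.digits 10 n) := by rw [this]
    _ = n := Nat.ofDigits_digits 10 n

theorem pv_toStr_inj (a b : Int) (ha : 0 ≤ a) (hb : 0 ≤ b)
    (h : PySem.Int.toStr a = PySem.Int.toStr b) : a = b := by
  have h' : PySem.Int.toChars a = PySem.Int.toChars b := by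
    rw [← PySem.Int.toList_toStr, ← PySem.Int.toList_toStr, h]
  rw [PySem.Int.toChars, PySem.Int.toChars, if_neg (by omega), if_neg (by omega)] at h'
  have := pv_toDigits10_inj a.toNat b.toNat h'
  omega

theorem pyNodeName_inj (a b : Int) (ha : 0 ≤ a) (hb : 0 ≤ b)
    (h : pyNodeName a = pyNodeName b) : a = b := by
  apply pv_toStr_inj a b ha hb
  apply String.toList_inj.mp
  have := congrArg String.toList h
  simp only [pyNodeName, String.toList_append] at this
  exact List.append_cancel_left this

-- the range list and the grid
theorem pv_range_eq (Nn : Int) :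
    PySem.List.pyRange 0 Nn 1 = (List.range Nn.toNat).map (fun k : Nat => (k : Int)) := by
  by_cases h : 0 ≤ Nn
  · lift Nn to ℕ using h with n
    rw [Int.toNat_natCast]
    exact PySem.List.pyRange_zero_natCast n
  · have h1 : PySem.List.pyRange 0 Nn 1 = [] := by
      apply List.eq_nil_iff_forall_not_mem.mpr
      intro x hx
      have := PySem.List.mem_pyRange_one.mp hx
      omega
    have h2 : Nn.toNat = 0 := by omega
    simp [h1, h2]

theorem pv_range_nodup (Nn : Int) : (PySem.List.pyRange 0 Nn 1).Nodup := by
  rw [pv_range_eq]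
  exact List.Nodup.map (fun a b h => by exact_mod_cast h) List.nodup_range

def pvGrid (Nn : Int) : List (Int × Int) :=
  (PySem.List.pyRange 0 Nn 1).flatMap (fun i => (PySem.List.pyRange 0 Nn 1).map (fun j => (i, j)))

theorem mem_pvGrid (Nn : Int) (p : Int × Int) :
    p ∈ pvGrid Nn ↔ (0 ≤ p.1 ∧ p.1 < Nn) ∧ (0 ≤ p.2 ∧ p.2 < Nn) := by
  obtain ⟨x, y⟩ := p
  simp [pvGrid, PySem.List.mem_pyRange_one]

theorem pvGrid_nodup (Nn : Int) : (pvGrid Nn).Nodup := by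
  have : pvGrid Nn = (PySem.List.pyRange 0 Nn 1) ×ˢ (PySem.List.pyRange 0 Nn 1) := rfl
  rw [this]
  exact List.Nodup.product (pv_range_nodup Nn) (pv_range_nodup Nn)

def pvKey (p : Int × Int) : Int × Int := (p.1 + 1, p.2 + 1)

theorem pvGrid_key_nodup (Nn : Int) : ((pvGrid Nn).map pvKey).Nodup := by
  apply List.Nodup.map _ (pvGrid_nodup Nn)
  intro a b h
  simp only [pvKey, Prod.mk.injEq] at h
  obtain ⟨a1, a2⟩ := a; obtain ⟨b1, b2⟩ := b
  simp only [Prod.mk.injEq]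
  omega

-- the index dict
def pvIdx (Nn : Int) : PySem.Dict String Int :=
  (PySem.List.pyRange 0 Nn 1).foldl (fun ix i => ix.insert (pyNodeName i) i) PySem.Dict.empty

theorem pv_get?_idx_gen (l : List Int) : ∀ (d : PySem.Dict String Int) (s : String) (a : Int),
    (l.map pyNodeName).Nodup →
    ((l.foldl (fun ix i => ix.insert (pyNodeName i) i) d).get? s = some a ↔
      ((a ∈ l ∧ s = pyNodeName a) ∨ ((∀ i ∈ l, pyNodeName i ≠ s) ∧ d.get? s = some a))) := by
  induction l with
  | nil => intro d s a _; simp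
  | cons i l ih =>
    intro d s a hnd
    simp only [List.map_cons, List.nodup_cons] at hnd
    rw [List.foldl_cons, ih _ s a hnd.2]
    by_cases hs : s = pyNodeName i
    · subst hs
      constructor
      · rintro (⟨hal, heq⟩ | ⟨hne, hget⟩)
        · exact absurd (heq ▸ List.mem_map_of_mem hal) hnd.1
        · rw [PySem.Dict.get?_insert] at hget
          simp at hget
          exact Or.inl ⟨by simp [hget], by rw [hget]⟩
      · rintro (⟨hal, heq⟩ | ⟨hne, _⟩)
        · rcases List.mem_cons.mp hal with h | h
          · subst h
            refine Or.inr ⟨?_, by rw [PySem.Dict.get?_insert]; simp⟩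
            intro j hj hj2
            exact hnd.1 (hj2 ▸ List.mem_map_of_mem hj)
          · exact absurd (heq ▸ List.mem_map_of_mem h) hnd.1
        · exact absurd rfl (hne i (by simp))
    · constructor
      · rintro (⟨hal, heq⟩ | ⟨hne, hget⟩)
        · exact Or.inl ⟨by simp [hal], heq⟩
        · rw [PySem.Dict.get?_insert, if_neg hs] at hget
          refine Or.inr ⟨?_, hget⟩
          intro j hj
          rcases List.mem_cons.mp hj with h | h
          · subst h; exact fun h' => hs h'.symm
          · exact hne j h
      · rintro (⟨hal, heq⟩ | ⟨hne, hget⟩)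
        · rcases List.mem_cons.mp hal with h | h
          · subst h; exact absurd heq hs
          · exact Or.inl ⟨h, heq⟩
        · exact Or.inr ⟨fun j hj => hne j (by simp [hj]), by rw [PySem.Dict.get?_insert, if_neg hs]; exact hget⟩

theorem pv_range_names_nodup (Nn : Int) : ((PySem.List.pyRange 0 Nn 1).map pyNodeName).Nodup := by
  apply List.Nodup.map_on _ (pv_range_nodup Nn)
  intro a ha b hb h
  have ha' := PySem.List.mem_pyRange_one.mp ha
  have hb' := PySem.List.mem_pyRange_one.mp hb
  exact pyNodeName_inj a b (by omega) (by omega) h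

theorem get?_pvIdx (Nn : Int) (s : String) (a : Int) :
    (pvIdx Nn).get? s = some a ↔ (0 ≤ a ∧ a < Nn ∧ s = pyNodeName a) := by
  rw [pvIdx, pv_get?_idx_gen _ _ _ _ (pv_range_names_nodup Nn)]
  simp [PySem.List.mem_pyRange_one]
  tauto

-- A's nested fold, flattened and characterised
theorem pv_items_A (Nn : Int) (nd : PySem.Dict String (List String)) :
    ((PySem.List.pyRange 0 Nn 1).foldl (fun acc n1 =>
      (PySem.List.pyRange 0 Nn 1).foldl (fun acc n2 =>
        if nd.contains (pyNodeName n1) && (nd.getD (pyNodeName n1) []).contains (pyNodeName n2) then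
          acc.insert (n1 + 1, n2 + 1) 1
        else
          acc.insert (n1 + 1, n2 + 1) 0) acc) (PySem.Dict.empty : PySem.Dict (Int × Int) Int)).items
    = (pvGrid Nn).map (fun p => (pvKey p,
        if nd.contains (pyNodeName p.1) && (nd.getD (pyNodeName p.1) []).contains (pyNodeName p.2) then (1 : Int) else 0)) := by
  have h1 : ((PySem.List.pyRange 0 Nn 1).foldl (fun acc n1 =>
      (PySem.List.pyRange 0 Nn 1).foldl (fun acc n2 =>
        if nd.contains (pyNodeName n1) && (nd.getD (pyNodeName n1) []).contains (pyNodeName n2) then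
          acc.insert (n1 + 1, n2 + 1) 1
        else
          acc.insert (n1 + 1, n2 + 1) 0) acc) (PySem.Dict.empty : PySem.Dict (Int × Int) Int))
      = (pvGrid Nn).foldl (fun acc p =>
          if nd.contains (pyNodeName p.1) && (nd.getD (pyNodeName p.1) []).contains (pyNodeName p.2) then
            acc.insert (p.1 + 1, p.2 + 1) 1
          else
            acc.insert (p.1 + 1, p.2 + 1) 0) PySem.Dict.empty := by
    rw [pvGrid, List.foldl_flatMap]
    simp only [List.foldl_map]
  rw [h1]
  have h2 : (fun (acc : PySem.Dict (Int × Int) Int) (p : Int × Int) =>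
        if nd.contains (pyNodeName p.1) && (nd.getD (pyNodeName p.1) []).contains (pyNodeName p.2) then
          acc.insert (p.1 + 1, p.2 + 1) 1
        else
          acc.insert (p.1 + 1, p.2 + 1) 0)
      = (fun (acc : PySem.Dict (Int × Int) Int) (p : Int × Int) => acc.insert (pvKey p)
          (if nd.contains (pyNodeName p.1) && (nd.getD (pyNodeName p.1) []).contains (pyNodeName p.2) then (1 : Int) else 0)) := by
    funext acc p
    split_ifs <;> rfl
  rw [h2, PySem.Dict.items_foldl_insert_fresh (pvGrid Nn) pvKey _ PySem.Dict.empty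
    (fun a _ => PySem.Dict.contains_empty _) (pvGrid_key_nodup Nn)]
  rfl

theorem pv_items_d0 (Nn : Int) :
    ((PySem.List.pyRange 0 Nn 1).foldl (fun acc i =>
      (PySem.List.pyRange 0 Nn 1).foldl (fun acc j => acc.insert (i + 1, j + 1) (0 : Int)) acc)
      (PySem.Dict.empty : PySem.Dict (Int × Int) Int)).items
    = (pvGrid Nn).map (fun p => (pvKey p, (0 : Int))) := by
  have h1 : ((PySem.List.pyRange 0 Nn 1).foldl (fun acc i =>
      (PySem.List.pyRange 0 Nn 1).foldl (fun acc j => acc.insert (i + 1, j + 1) (0 : Int)) acc)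
      (PySem.Dict.empty : PySem.Dict (Int × Int) Int))
      = (pvGrid Nn).foldl (fun acc p => acc.insert (p.1 + 1, p.2 + 1) (0 : Int)) PySem.Dict.empty := by
    rw [pvGrid, List.foldl_flatMap]
    simp only [List.foldl_map]
  have h2 : (fun (acc : PySem.Dict (Int × Int) Int) (p : Int × Int) => acc.insert (p.1 + 1, p.2 + 1) (0 : Int))
      = (fun (acc : PySem.Dict (Int × Int) Int) (p : Int × Int) => acc.insert (pvKey p) (0 : Int)) := by
    funext acc p; rfl
  rw [h1, h2, PySem.Dict.items_foldl_insert_fresh (pvGrid Nn) pvKey _ PySem.Dict.empty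
    (fun a _ => PySem.Dict.contains_empty _) (pvGrid_key_nodup Nn)]
  rfl

-- B's marking pass: value and keys
def pvHitV (Nn a : Int) (q : Int × Int) (v : String) : Bool :=
  match (pvIdx Nn).get? v with
  | some b => decide (q = (a + 1, b + 1))
  | none => false

def pvHitKV (Nn : Int) (q : Int × Int) (kv : String × List String) : Bool :=
  match (pvIdx Nn).get? kv.1 with
  | some a => kv.2.any (pvHitV Nn a q)
  | none => false

theorem pv_inner_get? (Nn a : Int) (vs : List String) : ∀ (d : PySem.Dict (Int × Int) Int) (q : Int × Int),
    (vs.foldl (fun acc v =>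
        match (pvIdx Nn).get? v with
        | none => acc
        | some b => acc.insert (a + 1, b + 1) 1) d).get? q
      = if vs.any (pvHitV Nn a q) then some 1 else d.get? q := by
  induction vs with
  | nil => intro d q; simp
  | cons v vs ih =>
    intro d q
    rw [List.foldl_cons, List.any_cons]
    cases hv : (pvIdx Nn).get? v with
    | none => simp only [pvHitV, hv]; simp [ih]
    | some b =>
      simp only [pvHitV, hv]
      rw [ih]
      by_cases hq : q = (a + 1, b + 1) <;> simp [hq, PySem.Dict.get?_insert]

theorem pv_inner_keys (Nn a : Int) (ha : 0 ≤ a ∧ a < Nn) (vs : List String) :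
    ∀ (d : PySem.Dict (Int × Int) Int),
    (∀ x y : Int, 0 ≤ x → x < Nn → 0 ≤ y → y < Nn → d.contains (x + 1, y + 1) = true) →
    (vs.foldl (fun acc v =>
        match (pvIdx Nn).get? v with
        | none => acc
        | some b => acc.insert (a + 1, b + 1) 1) d).keys = d.keys := by
  induction vs with
  | nil => intro d _; simp
  | cons v vs ih =>
    intro d hd
    rw [List.foldl_cons]
    cases hv : (pvIdx Nn).get? v with
    | none => exact ih d hd
    | some b =>
      have hb := (get?_pvIdx Nn v b).mp hv
      have hc : d.contains (a + 1, b + 1) = true := hd a b ha.1 ha.2 hb.1 hb.2.1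
      have hkeys := PySem.Dict.keys_insert_of_contains d (1 : Int) hc
      rw [ih _ ?_, hkeys]
      intro x y hx1 hx2 hy1 hy2
      rw [PySem.Dict.contains_iff_mem_keys, hkeys, ← PySem.Dict.contains_iff_mem_keys]
      exact hd x y hx1 hx2 hy1 hy2

theorem pv_outer_get? (Nn : Int) (entries : List (String × List String)) :
    ∀ (d : PySem.Dict (Int × Int) Int) (q : Int × Int),
    (entries.foldl (fun acc kv =>
        match (pvIdx Nn).get? kv.1 with
        | none => acc
        | some a => kv.2.foldl (fun acc v =>
            match (pvIdx Nn).get? v with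
            | none => acc
            | some b => acc.insert (a + 1, b + 1) 1) acc) d).get? q
      = if entries.any (pvHitKV Nn q) then some 1 else d.get? q := by
  induction entries with
  | nil => intro d q; simp
  | cons kv entries ih =>
    intro d q
    rw [List.foldl_cons, List.any_cons]
    cases hk : (pvIdx Nn).get? kv.1 with
    | none =>
      simp only [pvHitKV, hk, Bool.false_or]
      exact ih d q
    | some a =>
      simp only [pvHitKV, hk]
      rw [ih, pv_inner_get?]
      by_cases hvs : kv.2.any (pvHitV Nn a q) <;>
        by_cases he : entries.any (pvHitKV Nn q) <;> simp [hvs, he]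

theorem pv_outer_keys (Nn : Int) (entries : List (String × List String)) :
    ∀ (d : PySem.Dict (Int × Int) Int),
    (∀ x y : Int, 0 ≤ x → x < Nn → 0 ≤ y → y < Nn → d.contains (x + 1, y + 1) = true) →
    (entries.foldl (fun acc kv =>
        match (pvIdx Nn).get? kv.1 with
        | none => acc
        | some a => kv.2.foldl (fun acc v =>
            match (pvIdx Nn).get? v with
            | none => acc
            | some b => acc.insert (a + 1, b + 1) 1) acc) d).keys = d.keys := by
  induction entries with
  | nil => intro d _; simp
  | cons kv entries ih =>
    intro d hd
    rw [List.foldl_cons]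
    cases hk : (pvIdx Nn).get? kv.1 with
    | none => exact ih d hd
    | some a =>
      have ha := (get?_pvIdx Nn kv.1 a).mp hk
      have hkeys := pv_inner_keys Nn a ⟨ha.1, ha.2.1⟩ kv.2 d hd
      rw [ih _ ?_, hkeys]
      intro x y hx1 hx2 hy1 hy2
      rw [PySem.Dict.contains_iff_mem_keys, hkeys, ← PySem.Dict.contains_iff_mem_keys]
      exact hd x y hx1 hx2 hy1 hy2

-- A's per-cell condition agrees with B's edge-marking, pointwise on the grid
theorem pv_cond_iff (Nn : Int) (ndd : PySem.Dict String (List String)) (hnd : ndd.keys.Nodup)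
    (p : Int × Int) (hp : p ∈ pvGrid Nn) :
    ((ndd.contains (pyNodeName p.1) && (ndd.getD (pyNodeName p.1) []).contains (pyNodeName p.2)) = true ↔
      ndd.items.any (pvHitKV Nn (pvKey p)) = true) := by
  have hp' := (mem_pvGrid Nn p).mp hp
  rw [List.any_eq_true, Bool.and_eq_true]
  constructor
  · rintro ⟨hc, hm⟩
    rw [PySem.Dict.contains_eq_isSome_get?] at hc
    obtain ⟨vs, hvs⟩ := Option.isSome_iff_exists.mp hc
    refine ⟨(pyNodeName p.1, vs), PySem.Dict.mem_items_of_get?_eq_some ndd hvs, ?_⟩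
    have hgetD : ndd.getD (pyNodeName p.1) [] = vs := PySem.Dict.getD_of_get?_eq_some _ _ hvs
    rw [hgetD] at hm
    simp only [pvHitKV]
    rw [(get?_pvIdx Nn (pyNodeName p.1) p.1).mpr ⟨hp'.1.1, hp'.1.2, rfl⟩]
    rw [List.any_eq_true]
    refine ⟨pyNodeName p.2, by simpa using hm, ?_⟩
    simp only [pvHitV]
    rw [(get?_pvIdx Nn (pyNodeName p.2) p.2).mpr ⟨hp'.2.1, hp'.2.2, rfl⟩]
    simp [pvKey]
  · rintro ⟨kv, hkv, hhit⟩
    simp only [pvHitKV] at hhit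
    cases hk : (pvIdx Nn).get? kv.1 with
    | none => rw [hk] at hhit; simp at hhit
    | some a =>
      rw [hk] at hhit
      obtain ⟨v, hv, hvhit⟩ := List.any_eq_true.mp hhit
      simp only [pvHitV] at hvhit
      cases hb : (pvIdx Nn).get? v with
      | none => rw [hb] at hvhit; simp at hvhit
      | some b =>
        rw [hb] at hvhit
        have hq : pvKey p = (a + 1, b + 1) := by simpa using hvhit
        have ha := (get?_pvIdx Nn kv.1 a).mp hk
        have hbb := (get?_pvIdx Nn v b).mp hb
        have hab : a = p.1 ∧ b = p.2 := by
          simp only [pvKey, Prod.mk.injEq] at hq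
          omega
        obtain ⟨kvk, kvv⟩ := kv
        have hk1 : kvk = pyNodeName p.1 := by rw [← hab.1]; exact ha.2.2
        have hv1 : v = pyNodeName p.2 := by rw [← hab.2]; exact hbb.2.2
        subst hk1 hv1
        have hget := PySem.Dict.get?_of_mem_items ndd hkv hnd
        constructor
        · rw [PySem.Dict.contains_eq_isSome_get?, hget]; rfl
        · rw [PySem.Dict.getD_of_get?_eq_some _ _ hget]
          simpa using hv

-- ===== VERDICT (by name: the statement is the Claim_ definition above) =====
theorem define_neighborhood_spec : Claim_equal_define_neighborhood := by
  intro Nn nds _dom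
  show define_neighborhood Nn nds = define_neighborhood_alt Nn nds
  unfold define_neighborhood define_neighborhood_alt
  simp only []
  rw [show ((PySem.List.pyRange 0 Nn 1).foldl (fun ix i => ix.insert (pyNodeName i) i)
      (PySem.Dict.empty : PySem.Dict String Int)) = pvIdx Nn from rfl]
  congr 1
  set ndd := PySem.Dict.ofList nds with hndd
  rw [pv_items_A Nn ndd]
  have hd0items := pv_items_d0 Nn
  have hd0keys : ((PySem.List.pyRange 0 Nn 1).foldl (fun acc i =>
      (PySem.List.pyRange 0 Nn 1).foldl (fun acc j => acc.insert (i + 1, j + 1) (0 : Int)) acc)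
      (PySem.Dict.empty : PySem.Dict (Int × Int) Int)).keys = (pvGrid Nn).map pvKey := by
    simp only [PySem.Dict.keys, hd0items, List.map_map]
    rfl
  have hd0contains : ∀ x y : Int, 0 ≤ x → x < Nn → 0 ≤ y → y < Nn →
      ((PySem.List.pyRange 0 Nn 1).foldl (fun acc i =>
        (PySem.List.pyRange 0 Nn 1).foldl (fun acc j => acc.insert (i + 1, j + 1) (0 : Int)) acc)
        (PySem.Dict.empty : PySem.Dict (Int × Int) Int)).contains (x + 1, y + 1) = true := by
    intro x y hx1 hx2 hy1 hy2
    rw [PySem.Dict.contains_iff_mem_keys, hd0keys]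
    exact List.mem_map_of_mem ((mem_pvGrid Nn (x, y)).mpr ⟨⟨hx1, hx2⟩, ⟨hy1, hy2⟩⟩)
  have hkeysB := (pv_outer_keys Nn ndd.items _ hd0contains).trans hd0keys
  have hnodupB : (ndd.items.foldl (fun acc kv =>
      match (pvIdx Nn).get? kv.1 with
      | none => acc
      | some a => kv.2.foldl (fun acc v =>
          match (pvIdx Nn).get? v with
          | none => acc
          | some b => acc.insert (a + 1, b + 1) 1) acc)
      ((PySem.List.pyRange 0 Nn 1).foldl (fun acc i =>
        (PySem.List.pyRange 0 Nn 1).foldl (fun acc j => acc.insert (i + 1, j + 1) (0 : Int)) acc)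
        (PySem.Dict.empty : PySem.Dict (Int × Int) Int))).keys.Nodup := by
    rw [hkeysB]; exact pvGrid_key_nodup Nn
  rw [PySem.Dict.items_eq_map_keys _ hnodupB 0, hkeysB, List.map_map]
  apply List.map_congr_left
  intro p hp
  simp only [Function.comp]
  have hget0 : ((PySem.List.pyRange 0 Nn 1).foldl (fun acc i =>
      (PySem.List.pyRange 0 Nn 1).foldl (fun acc j => acc.insert (i + 1, j + 1) (0 : Int)) acc)
      (PySem.Dict.empty : PySem.Dict (Int × Int) Int)).get? (pvKey p) = some 0 := by
    apply PySem.Dict.get?_of_mem_items _ _ (by rw [hd0keys]; exact pvGrid_key_nodup Nn)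
    rw [hd0items]
    exact List.mem_map_of_mem hp
  have hgetB := pv_outer_get? Nn ndd.items
      ((PySem.List.pyRange 0 Nn 1).foldl (fun acc i =>
        (PySem.List.pyRange 0 Nn 1).foldl (fun acc j => acc.insert (i + 1, j + 1) (0 : Int)) acc)
        (PySem.Dict.empty : PySem.Dict (Int × Int) Int)) (pvKey p)
  have hvalB : PySem.Dict.getD (ndd.items.foldl (fun acc kv =>
      match (pvIdx Nn).get? kv.1 with
      | none => acc
      | some a => kv.2.foldl (fun acc v =>
          match (pvIdx Nn).get? v with
          | none => acc
          | some b => acc.insert (a + 1, b + 1) 1) acc)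
      ((PySem.List.pyRange 0 Nn 1).foldl (fun acc i =>
        (PySem.List.pyRange 0 Nn 1).foldl (fun acc j => acc.insert (i + 1, j + 1) (0 : Int)) acc)
        (PySem.Dict.empty : PySem.Dict (Int × Int) Int))) (pvKey p) 0
      = if ndd.items.any (pvHitKV Nn (pvKey p)) then (1 : Int) else 0 := by
    rw [PySem.Dict.getD_eq_get?_getD, hgetB, hget0]
    by_cases h : ndd.items.any (pvHitKV Nn (pvKey p)) <;> simp [h]
  rw [hvalB]
  have hiff := pv_cond_iff Nn ndd (PySem.Dict.nodup_keys_ofList nds) p hp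
  by_cases hc : (ndd.contains (pyNodeName p.1) && (ndd.getD (pyNodeName p.1) []).contains (pyNodeName p.2)) = true
  · rw [if_pos hc, if_pos (hiff.mp hc)]
  · rw [if_neg hc, if_neg (fun h => hc (hiff.mpr h))]
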